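-- pv_equiv track=rewrite | github.com/qbein/Advent-of-Code | december_03.py | count_occurences
-- ===== SOURCE A (Python) =====
-- def count_occurences(lines):
--   counts = []
--   for line in lines:
--     for index, character in enumerate(line):
--       if(len(counts) <= index):
--         counts.append(int(character))
--       else:
--         counts[index] += int(character)
--   return counts
-- ===== SOURCE B (Python) =====
-- def count_occurences(lines):
--   width = max((len(line) for line in lines), default=0)
--   return [sum(int(line[i]) for line in lines if i < len(line)) for i in range(width)]
-- ===== Notes on version B (the rewrite author's own statement) =====
-- stated objective: alternative
-- what changed: Replaces A's row-major incremental pass (append a new column or increment an existing one per character) with a column-major scan: compute width = max line length, then build the result one column at a time by summing int(line[i]) over the lines long enough.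
-- outside the precondition, e.g. on count_occurences(['1a']): A raises ValueError, B raises ValueError
import Mathlib
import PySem

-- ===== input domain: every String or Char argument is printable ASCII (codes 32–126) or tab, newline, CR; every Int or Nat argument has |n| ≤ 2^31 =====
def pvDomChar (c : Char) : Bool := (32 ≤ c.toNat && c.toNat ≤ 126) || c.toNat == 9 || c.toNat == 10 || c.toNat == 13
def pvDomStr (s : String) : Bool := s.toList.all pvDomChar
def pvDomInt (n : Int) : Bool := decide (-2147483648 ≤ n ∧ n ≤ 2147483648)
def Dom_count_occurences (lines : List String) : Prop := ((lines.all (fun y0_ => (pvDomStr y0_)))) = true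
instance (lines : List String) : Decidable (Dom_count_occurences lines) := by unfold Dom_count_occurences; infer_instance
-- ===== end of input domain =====

-- B replaces A's row-major incremental pass (append-or-increment per character) by a
-- column-major scan: width = max line length, then one sum per column index (objective: alternative).

-- int(c) for a single digit character c (exact on Pre_, where every character is '0'..'9')
def pvDigit (c : Char) : Int := (c.toNat : Int) - 48

-- ===== PORT A =====
-- inner loop: for index, character in enumerate(line): …
def pvStepA (counts : List Int) (line : String) : List Int :=
  (PySem.List.enumerate line.toList 0).foldl
    (fun cs p =>
      if (cs.length : Int) ≤ p.1 then cs ++ [pvDigit p.2]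
      else cs.set p.1.toNat (cs.getD p.1.toNat 0 + pvDigit p.2))
    counts

def count_occurences (lines : List String) : List Int :=
  lines.foldl pvStepA []

-- ===== PORT B =====
-- width = max((len(line) for line in lines), default=0): lengths are ≥ 0, so this is foldl max 0
def count_occurences_alt (lines : List String) : List Int :=
  let width := lines.foldl (fun m l => max m l.toList.length) 0
  (List.range width).map (fun i =>
    lines.foldl (fun s l =>
      if i < l.toList.length then s + pvDigit (l.toList.getD i ' ') else s) 0)

-- ===== PRECONDITION & SPEC =====
-- Pre_ excludes inputs containing a non-digit character, on which both Pythons raise ValueError (int(c)).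
def Pre_count_occurences (lines : List String) : Prop :=
  (lines.all (fun l => l.toList.all (fun c => '0' ≤ c && c ≤ '9'))) = true
instance (lines : List String) : Decidable (Pre_count_occurences lines) := by
  unfold Pre_count_occurences; infer_instance
def pvWitness_count_occurences : List String := (["12", "3"])

def Spec_count_occurences (lines : List String) (out : List Int) : Prop := out = count_occurences_alt lines
instance (lines : List String) (out : List Int) : Decidable (Spec_count_occurences lines out) := by unfold Spec_count_occurences; infer_instance

-- ===== CLAIM (what is proved, stated in full; the proofs are below) =====
def Claim_equal_count_occurences : Prop := ∀ (lines : List String), Dom_count_occurences lines → Pre_count_occurences lines → Spec_count_occurences lines (count_occurences lines)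

-- ===== LEMMAS AND PROOFS =====

-- pad-with-zero pointwise addition, second operand a digit list; A's inner loop computes this
def pvMerge : List Int → List Int → List Int
  | cs, [] => cs
  | [], d :: ds => d :: pvMerge [] ds
  | c :: cs, d :: ds => (c + d) :: pvMerge cs ds

theorem pvMerge_nil_left (ds : List Int) : pvMerge [] ds = ds := by
  induction ds with
  | nil => rfl
  | cons d ds ih => simp [pvMerge, ih]

theorem pvMerge_length (cs ds : List Int) : (pvMerge cs ds).length = max cs.length ds.length := by
  induction cs generalizing ds with
  | nil => simp [pvMerge_nil_left]
  | cons c cs ih =>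
    cases ds with
    | nil => simp [pvMerge]
    | cons d ds => simp [pvMerge, ih]

theorem pvMerge_getD (cs ds : List Int) (i : Nat) :
    (pvMerge cs ds).getD i 0 = cs.getD i 0 + ds.getD i 0 := by
  induction cs generalizing ds i with
  | nil => simp [pvMerge_nil_left]
  | cons c cs ih =>
    cases ds with
    | nil => simp [pvMerge]
    | cons d ds =>
      cases i with
      | zero => simp [pvMerge]
      | succ i =>
        simp only [pvMerge, List.getD_cons_succ]
        exact ih ds i

-- the generalized inner loop of A, starting at index k
theorem pvStepA_inner (chs : List Char) (k : Nat) (cs : List Int) (hk : k ≤ cs.length) :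
    (PySem.List.enumerate chs (k : Int)).foldl
      (fun cs p =>
        if (cs.length : Int) ≤ p.1 then cs ++ [pvDigit p.2]
        else cs.set p.1.toNat (cs.getD p.1.toNat 0 + pvDigit p.2))
      cs
    = cs.take k ++ pvMerge (cs.drop k) (chs.map pvDigit) := by
  induction chs generalizing k cs with
  | nil => simp [PySem.List.enumerate_nil, pvMerge]
  | cons ch chs ih =>
    rw [PySem.List.enumerate_cons]
    simp only [List.foldl_cons]
    by_cases h : cs.length ≤ k
    · have hkeq : k = cs.length := le_antisymm hk h
      have hcond : ((cs.length : Int) ≤ (k : Int)) := by exact_mod_cast h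
      rw [if_pos hcond]
      have : ((k : Int) + 1) = (((k + 1 : Nat)) : Int) := by push_cast; ring
      rw [this, ih (k + 1) (cs ++ [pvDigit ch]) (by simp; omega)]
      subst hkeq
      have h1 : (cs ++ [pvDigit ch]).take (cs.length + 1) = cs ++ [pvDigit ch] :=
        List.take_of_length_le (by simp)
      have h2 : (cs ++ [pvDigit ch]).drop (cs.length + 1) = [] :=
        List.drop_of_length_le (by simp)
      rw [h1, h2]
      simp [pvMerge_nil_left, List.take_length, List.drop_length]
    · have hlt : k < cs.length := by omega
      have hcond : ¬ ((cs.length : Int) ≤ (k : Int)) := by exact_mod_cast h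
      rw [if_neg hcond]
      simp only [Int.toNat_natCast]
      have hset : cs.set k (cs.getD k 0 + pvDigit ch)
          = cs.take k ++ (cs.getD k 0 + pvDigit ch) :: cs.drop (k + 1) :=
        List.set_eq_take_cons_drop _ hlt
      have : ((k : Int) + 1) = (((k + 1 : Nat)) : Int) := by push_cast; ring
      rw [this, ih (k + 1) _ (by simp; omega), hset]
      have hltk : (cs.take k).length = k := by simp; omega
      have htake : (cs.take k ++ (cs.getD k 0 + pvDigit ch) :: cs.drop (k + 1)).take (k + 1)
          = cs.take k ++ [cs.getD k 0 + pvDigit ch] := by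
        rw [List.take_append, hltk, (by omega : k + 1 - k = 1)]
        simp [List.take_take]
      have hdrop : (cs.take k ++ (cs.getD k 0 + pvDigit ch) :: cs.drop (k + 1)).drop (k + 1)
          = cs.drop (k + 1) := by
        have e1 : (cs.take k).drop (k + 1) = [] :=
          List.drop_of_length_le (by simp)
        rw [List.drop_append, hltk, (by omega : k + 1 - k = 1), e1]
        simp
      rw [htake, hdrop]
      have hdk : cs.drop k = cs.getD k 0 :: cs.drop (k + 1) := by
        rw [List.getD_eq_getElem _ _ hlt]
        exact (List.drop_eq_getElem_cons hlt)
      rw [hdk]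
      simp [pvMerge, List.append_assoc]

theorem pvStepA_eq_merge (cs : List Int) (line : String) :
    pvStepA cs line = pvMerge cs (line.toList.map pvDigit) := by
  have := pvStepA_inner line.toList 0 cs (Nat.zero_le _)
  simpa [pvStepA] using this

-- digits-list getD in terms of the guarded column read used by B
theorem pvDigits_getD (l : String) (i : Nat) :
    (l.toList.map pvDigit).getD i 0
      = if i < l.toList.length then pvDigit (l.toList.getD i ' ') else 0 := by
  by_cases h : i < l.toList.length
  · rw [if_pos h, List.getD_eq_getElem _ _ (by simpa using h),
        List.getD_eq_getElem _ _ h]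
    simp
  · rw [if_neg h, List.getD_eq_default _ _ (by simpa using le_of_not_gt h)]

theorem pvFold_length (lines : List String) (cs : List Int) :
    (lines.foldl pvStepA cs).length
      = lines.foldl (fun m l => max m l.toList.length) cs.length := by
  induction lines generalizing cs with
  | nil => rfl
  | cons l ls ih =>
    simp only [List.foldl_cons]
    rw [ih, pvStepA_eq_merge, pvMerge_length]
    simp

theorem pvFold_getD (lines : List String) (cs : List Int) (i : Nat) :
    (lines.foldl pvStepA cs).getD i 0
      = lines.foldl (fun s l =>
          if i < l.toList.length then s + pvDigit (l.toList.getD i ' ') else s) (cs.getD i 0) := by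
  induction lines generalizing cs with
  | nil => rfl
  | cons l ls ih =>
    simp only [List.foldl_cons]
    rw [ih, pvStepA_eq_merge, pvMerge_getD, pvDigits_getD]
    congr 1
    split <;> simp

-- ===== VERDICT (by name: the statement is the Claim_ definition above) =====
theorem count_occurences_spec : Claim_equal_count_occurences := by
  intro lines _ _
  unfold Spec_count_occurences count_occurences count_occurences_alt
  have hlen : (lines.foldl pvStepA []).length
      = lines.foldl (fun m l => max m l.toList.length) 0 := by
    simpa using pvFold_length lines []
  apply List.ext_getElem
  · simpa using hlen
  · intro i h1 h2
    have hda := pvFold_getD lines [] i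
    have hA : (lines.foldl pvStepA [])[i] = (lines.foldl pvStepA []).getD i 0 :=
      (List.getD_eq_getElem _ _ h1).symm
    simp only [List.getElem_map, List.getElem_range]
    rw [hA, hda]
    simp
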